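-- pv_equiv track=rewrite | github.com/HallAlexander/Python | VS Code/Python/Kattis/rational_sequence3.py | get_fraction
-- ===== SOURCE A (Python) =====
-- def get_fraction(goal):
--     if goal == 1:
--         return 1, 1
--     p, q = 1, 1
--     stack = []
--
--     while goal > 1:
--         if goal % 2 == 0:
--             stack.append(True)  # even
--         else:
--             stack.append(False)  # odd
--         goal //= 2
--
--     while stack:
--         if stack.pop():
--             p, q = p, p + q
--         else:
--             p, q = p + q, q
--
--     return p, q
-- ===== SOURCE B (Python) =====
-- def get_fraction(goal):
--     if goal <= 1:
--         return 1, 1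
--     p, q = get_fraction(goal // 2)
--     return (p, p + q) if goal % 2 == 0 else (p + q, q)
-- ===== Notes on version B (the rewrite author's own statement) =====
-- stated objective: simpler
-- what changed: Replaced the explicit bit-stack build-then-pop loops with a direct recursion on the halved index that applies each parity bit as the recursion unwinds, eliminating the intermediate list.
import Mathlib
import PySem

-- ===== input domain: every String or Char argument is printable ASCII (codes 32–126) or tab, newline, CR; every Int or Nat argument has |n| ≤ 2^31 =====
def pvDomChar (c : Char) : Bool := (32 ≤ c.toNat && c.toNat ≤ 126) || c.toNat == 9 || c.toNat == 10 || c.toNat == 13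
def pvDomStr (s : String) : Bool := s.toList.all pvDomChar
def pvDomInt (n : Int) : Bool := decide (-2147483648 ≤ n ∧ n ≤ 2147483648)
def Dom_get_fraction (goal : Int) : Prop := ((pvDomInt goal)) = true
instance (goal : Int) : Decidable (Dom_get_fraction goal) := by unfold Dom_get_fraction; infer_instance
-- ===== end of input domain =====

-- B replaces A's build-a-bit-stack-then-pop loops by a direct recursion on goal // 2
-- that applies each parity bit as the recursion unwinds (objective: simpler, no intermediate list).

-- ===== PORT A =====
-- first while loop: push parity bits while goal > 1, halving goal
def get_fraction_build (goal : Int) (stack : List Bool) : List Bool :=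
  if _h : goal > 1 then
    get_fraction_build (PySem.Int.floordiv goal 2) (stack ++ [PySem.Int.mod goal 2 == 0])
  else stack
termination_by goal.toNat
decreasing_by
  rw [PySem.Int.floordiv_eq_ediv_of_pos (by omega)]
  omega

-- second while loop: pop from the end of the stack until empty; popping the list
-- back-to-front is rendered exactly as a head-first walk over its reverse
def get_fraction_pop (p q : Int) (stack : List Bool) : Int × Int :=
  match stack with
  | [] => (p, q)
  | b :: rest => if b then get_fraction_pop p (p + q) rest else get_fraction_pop (p + q) q rest

def get_fraction (goal : Int) : Int × Int :=
  if goal == 1 then (1, 1)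
  else get_fraction_pop 1 1 (get_fraction_build goal []).reverse

-- ===== PORT B =====
def get_fraction_alt (goal : Int) : Int × Int :=
  if _h : goal ≤ 1 then (1, 1)
  else
    let pq := get_fraction_alt (PySem.Int.floordiv goal 2)
    if PySem.Int.mod goal 2 == 0 then (pq.1, pq.1 + pq.2) else (pq.1 + pq.2, pq.2)
termination_by goal.toNat
decreasing_by
  rw [PySem.Int.floordiv_eq_ediv_of_pos (by omega)]
  omega

-- ===== PRECONDITION & SPEC =====
def Spec_get_fraction (goal : Int) (out : Int × Int) : Prop := out = get_fraction_alt goal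
instance (goal : Int) (out : Int × Int) : Decidable (Spec_get_fraction goal out) := by unfold Spec_get_fraction; infer_instance

-- ===== CLAIM (what is proved, stated in full; the proofs are below) =====
def Claim_equal_get_fraction : Prop := ∀ (goal : Int), Dom_get_fraction goal → Spec_get_fraction goal (get_fraction goal)

-- ===== LEMMAS AND PROOFS =====

theorem build_append (goal : Int) (s : List Bool) :
    get_fraction_build goal s = s ++ get_fraction_build goal [] := by
  by_cases h : goal > 1
  · conv_lhs => rw [get_fraction_build]
    conv_rhs => rw [get_fraction_build]
    rw [dif_pos h, dif_pos h,
      build_append (PySem.Int.floordiv goal 2) (s ++ [PySem.Int.mod goal 2 == 0]),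
      build_append (PySem.Int.floordiv goal 2) ([] ++ [PySem.Int.mod goal 2 == 0])]
    simp
  · conv_lhs => rw [get_fraction_build]
    conv_rhs => rw [get_fraction_build]
    rw [dif_neg h, dif_neg h]
    simp
termination_by goal.toNat
decreasing_by
  all_goals rw [PySem.Int.floordiv_eq_ediv_of_pos (by omega)]; omega

theorem pop_snoc (p q : Int) (l : List Bool) (b : Bool) :
    get_fraction_pop p q (l ++ [b]) =
      (let pq := get_fraction_pop p q l
       if b then (pq.1, pq.1 + pq.2) else (pq.1 + pq.2, pq.2)) := by
  induction l generalizing p q with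
  | nil => cases b <;> simp [get_fraction_pop]
  | cons c rest ih =>
      cases c <;> simp only [get_fraction_pop, List.cons_append, if_true, if_false,
        Bool.false_eq_true, cond_true, cond_false] <;> exact ih _ _

theorem loop_eq_alt (goal : Int) :
    get_fraction_pop 1 1 (get_fraction_build goal []).reverse = get_fraction_alt goal := by
  induction goal using get_fraction_alt.induct with
  | case1 g hg =>
      rw [get_fraction_build, dif_neg (show ¬ g > 1 by omega), get_fraction_alt, dif_pos hg]
      rfl
  | case2 g hg hmod ih =>
      rw [get_fraction_build, dif_pos (show g > 1 by omega), build_append, get_fraction_alt, dif_neg hg]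
      simp only [List.nil_append, List.reverse_cons, List.singleton_append]
      rw [pop_snoc, ih, hmod]
  | case3 g hg hmod ih =>
      rw [get_fraction_build, dif_pos (show g > 1 by omega), build_append, get_fraction_alt, dif_neg hg]
      simp only [List.nil_append, List.reverse_cons, List.singleton_append]
      rw [pop_snoc, ih]

-- ===== VERDICT (by name: the statement is the Claim_ definition above) =====
theorem get_fraction_spec : Claim_equal_get_fraction := by
  intro goal _
  unfold Spec_get_fraction get_fraction
  by_cases h1 : goal = 1
  · subst h1
    simp [get_fraction_alt]
  · rw [if_neg (by simpa using h1), loop_eq_alt]
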